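-- pv_equiv track=rewrite | github.com/gtzigiannis/crosssecmom2 | feature_lab/base.py | partition_features
-- ===== SOURCE A (Python) =====
-- from typing import Dict, List, Optional, Tuple, Set
--
-- RISK_PATTERNS = [
--     # Volatility family
--     'std', 'ATR', 'BBW', 'parkinson', 'garman_klass', 'rogers_satchell',
--     'realized_vol', 'RV_', 'vol_', 'Ret1dZ', 'volatility',
--     # Beta family
--     'beta', 'corr_mkt', 'corr_VT', 'corr_BNDW', 'r_squared', 'downside_beta',
--     'idio', 'corr_VIX', 'corr_MOVE', 'beta_VT', 'beta_BNDW',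
--     # Liquidity family
--     'amihud', 'spread', 'kyle', 'illiq', 'roll_spread', 'ADV_',
--     'volume', 'rel_vol', 'turnover', 'obv', 'pv_corr',
--     # Regime/tail family
--     'regime', 'vol_of_vol', 'Hurst', 'crash_flag', 'meltup_flag',
--     'high_vol', 'low_vol', 'streak', 'days_since',
--     'max_dd', 'DD', 'var_', 'cvar', 'semi_vol', 'skew', 'kurt',
--     'down_corr', 'drawdown_corr',
-- ]
--
-- def classify_feature_role(feature_name: str) -> str:
--     """
--     Classify a feature as 'alpha' or 'risk' based on name patterns.
--
--     Rules (from feature_alpha.md, feature_risk.md):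
--     - Risk features: volatility, beta, liquidity, regime patterns
--     - Interaction features: classified based on participants
--       - If ANY participant is risk -> risk
--       - Otherwise -> alpha
--     - All other features -> alpha
--
--     Returns: 'alpha' or 'risk'
--     """
--     feature_lower = feature_name.lower()
--
--     # Check for interaction patterns
--     interaction_markers = ['_x_', '_div_', '_minus_', '_in_']
--     is_interaction = any(marker in feature_lower for marker in interaction_markers)
--
--     if is_interaction:
--         # For interactions, check if ANY participant is a risk feature
--         # Split by interaction markers to get participants
--         participants = feature_name
--         for marker in interaction_markers:
--             participants = participants.replace(marker, '|||')
--         participant_list = [p.strip() for p in participants.split('|||') if p.strip()]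
--
--         # If any participant matches risk patterns -> risk interaction
--         for participant in participant_list:
--             if _matches_risk_patterns(participant):
--                 return 'risk'
--         return 'alpha'
--
--     # For base features, check risk patterns directly
--     if _matches_risk_patterns(feature_name):
--         return 'risk'
--
--     return 'alpha'
--
-- def _matches_risk_patterns(name: str) -> bool:
--     """Check if feature name matches any risk pattern."""
--     name_lower = name.lower()
--     for pattern in RISK_PATTERNS:
--         if pattern.lower() in name_lower:
--             return True
--     return False
--
-- def partition_features(feature_columns: List[str]) -> Dict[str, List[str]]:
--     """
--     Partition features into alpha and risk categories.
--
--     Returns: {'alpha': [...], 'risk': [...]}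
--     """
--     alpha_features = []
--     risk_features = []
--
--     for f in feature_columns:
--         if classify_feature_role(f) == 'risk':
--             risk_features.append(f)
--         else:
--             alpha_features.append(f)
--
--     return {'alpha': alpha_features, 'risk': risk_features}
-- ===== SOURCE B (Python) =====
-- # Simpler, uniform classifier: no interaction/base branch and no participant
-- # split -- markers are replaced by a sentinel and a single position-driven scan
-- # over the lowered string asks whether any risk pattern starts at some index;
-- # the partition is staged: flags
-- # computed once, then two zip-filters.
--
-- RISK_PATTERNS = [
--     'std', 'ATR', 'BBW', 'parkinson', 'garman_klass', 'rogers_satchell',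
--     'realized_vol', 'RV_', 'vol_', 'Ret1dZ', 'volatility',
--     'beta', 'corr_mkt', 'corr_VT', 'corr_BNDW', 'r_squared', 'downside_beta',
--     'idio', 'corr_VIX', 'corr_MOVE', 'beta_VT', 'beta_BNDW',
--     'amihud', 'spread', 'kyle', 'illiq', 'roll_spread', 'ADV_',
--     'volume', 'rel_vol', 'turnover', 'obv', 'pv_corr',
--     'regime', 'vol_of_vol', 'Hurst', 'crash_flag', 'meltup_flag',
--     'high_vol', 'low_vol', 'streak', 'days_since',
--     'max_dd', 'DD', 'var_', 'cvar', 'semi_vol', 'skew', 'kurt',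
--     'down_corr', 'drawdown_corr',
-- ]
--
-- _RISK_LOWER = [p.lower() for p in RISK_PATTERNS]
-- _MARKERS = ['_x_', '_div_', '_minus_', '_in_']
--
-- # hash index: first character -> the risk patterns starting with it
-- _BY_FIRST = {}
-- for pat in _RISK_LOWER:
--     _BY_FIRST.setdefault(pat[0], []).append(pat)
--
--
-- def _is_risk(name):
--     s = name
--     for marker in _MARKERS:
--         s = s.replace(marker, '|||')
--     low = s.lower()
--     # position-driven scan: does some risk pattern start at some index?
--     # only patterns whose first character is low[i] can start at i, so the
--     # inner scan of the whole pattern list becomes a dict-bucket lookup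
--     # (no pattern contains '|', so a match never crosses a marker boundary)
--     for i, c in enumerate(low):
--         for pat in _BY_FIRST.get(c, []):
--             if low.startswith(pat, i):
--                 return True
--     return False
--
--
-- def partition_features(feature_columns):
--     flags = [_is_risk(f) for f in feature_columns]
--     return {'alpha': [f for f, r in zip(feature_columns, flags) if not r],
--             'risk': [f for f, r in zip(feature_columns, flags) if r]}
-- ===== Notes on version B (the rewrite author's own statement) =====
-- stated objective: alternative
-- what changed: B drops the interaction/base branch and the participant split entirely: markers are replaced by a sentinel and a position-driven scan over the lowered name asks whether a risk pattern starts at some index, with a hash index (first character -> patterns) replacing the inner scan of the whole pattern list; the partition is staged -- the risk flag of each name is computed once into a list and the two buckets are zip-filters over it -- instead of A's classifier-string comparison inside a single accumulator loop.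
import Mathlib
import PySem

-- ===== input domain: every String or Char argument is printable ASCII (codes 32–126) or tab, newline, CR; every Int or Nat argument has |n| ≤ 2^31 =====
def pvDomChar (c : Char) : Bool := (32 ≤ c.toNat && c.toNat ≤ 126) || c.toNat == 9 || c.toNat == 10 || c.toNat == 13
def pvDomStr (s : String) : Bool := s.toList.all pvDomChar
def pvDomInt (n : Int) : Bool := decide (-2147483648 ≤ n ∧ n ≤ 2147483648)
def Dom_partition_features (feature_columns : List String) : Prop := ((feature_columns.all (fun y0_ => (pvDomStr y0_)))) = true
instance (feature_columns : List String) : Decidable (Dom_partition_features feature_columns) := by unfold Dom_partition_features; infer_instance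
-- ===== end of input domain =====

-- B replaces A's interaction/base branch and participant split with one uniform
-- position-driven scan (does some risk pattern start at some index of the
-- marker-replaced, lowered name?), and stages the partition: flags once, then
-- two zip-filters; same return value, objective: alternative decomposition.

-- ===== PORT A =====

def pvRiskPatternsA : List String := [
  "std", "ATR", "BBW", "parkinson", "garman_klass", "rogers_satchell",
  "realized_vol", "RV_", "vol_", "Ret1dZ", "volatility",
  "beta", "corr_mkt", "corr_VT", "corr_BNDW", "r_squared", "downside_beta",
  "idio", "corr_VIX", "corr_MOVE", "beta_VT", "beta_BNDW",
  "amihud", "spread", "kyle", "illiq", "roll_spread", "ADV_",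
  "volume", "rel_vol", "turnover", "obv", "pv_corr",
  "regime", "vol_of_vol", "Hurst", "crash_flag", "meltup_flag",
  "high_vol", "low_vol", "streak", "days_since",
  "max_dd", "DD", "var_", "cvar", "semi_vol", "skew", "kurt",
  "down_corr", "drawdown_corr"]

def pvMatchesRiskA (name : String) : Bool :=
  let nameLower := PySem.Str.lower name
  pvRiskPatternsA.any (fun pattern => PySem.Str.isIn (PySem.Str.lower pattern) nameLower)

def pvInteractionMarkersA : List String := ["_x_", "_div_", "_minus_", "_in_"]

def pvClassifyFeatureRoleA (feature_name : String) : String :=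
  let featureLower := PySem.Str.lower feature_name
  if pvInteractionMarkersA.any (fun marker => PySem.Str.isIn marker featureLower) then
    let participants :=
      pvInteractionMarkersA.foldl (fun s marker => PySem.Str.replace s marker "|||") feature_name
    let participantList :=
      (((PySem.Str.split? participants "|||").getD []).map PySem.Str.strip).filter (fun p => p ≠ "")
    if participantList.any pvMatchesRiskA then "risk" else "alpha"
  else
    if pvMatchesRiskA feature_name then "risk" else "alpha"

def partition_features (feature_columns : List String) : List (String × List String) :=
  let acc := feature_columns.foldl
    (fun (acc : List String × List String) f =>
      if pvClassifyFeatureRoleA f == "risk" then (acc.1, acc.2 ++ [f]) else (acc.1 ++ [f], acc.2))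
    ([], [])
  [("alpha", acc.1), ("risk", acc.2)]

-- ===== PORT B =====

def pvRiskPatternsB : List String := [
  "std", "ATR", "BBW", "parkinson", "garman_klass", "rogers_satchell",
  "realized_vol", "RV_", "vol_", "Ret1dZ", "volatility",
  "beta", "corr_mkt", "corr_VT", "corr_BNDW", "r_squared", "downside_beta",
  "idio", "corr_VIX", "corr_MOVE", "beta_VT", "beta_BNDW",
  "amihud", "spread", "kyle", "illiq", "roll_spread", "ADV_",
  "volume", "rel_vol", "turnover", "obv", "pv_corr",
  "regime", "vol_of_vol", "Hurst", "crash_flag", "meltup_flag",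
  "high_vol", "low_vol", "streak", "days_since",
  "max_dd", "DD", "var_", "cvar", "semi_vol", "skew", "kurt",
  "down_corr", "drawdown_corr"]

def pvRiskLowerB : List String := pvRiskPatternsB.map PySem.Str.lower

def pvMarkersB : List String := ["_x_", "_div_", "_minus_", "_in_"]

-- _BY_FIRST: setdefault(pat[0], []).append(pat) is d[k] = d.get(k, []) + [pat],
-- i.e. Dict.modify; pat[0] is exact via headD since every pattern is a
-- nonempty literal.
def pvByFirstB : PySem.Dict Char (List String) :=
  pvRiskLowerB.foldl (fun d pat => d.modify (pat.toList.headD ' ') [] (· ++ [pat]))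
    PySem.Dict.empty

-- low.startswith(pat, i) for i from enumerate (so 0 ≤ i, i.toNat exact) is
-- PySem.Chars.startswith on the suffix low[i:]; .get(c, []) is Dict.getD.
def pvIsRiskB (name : String) : Bool :=
  let s := pvMarkersB.foldl (fun s marker => PySem.Str.replace s marker "|||") name
  let low := PySem.Chars.lower s.toList
  (PySem.List.enumerate low).any (fun ic =>
    (pvByFirstB.getD ic.2 []).any (fun pat =>
      PySem.Chars.startswith (low.drop ic.1.toNat) pat.toList))

def partition_features_alt (feature_columns : List String) : List (String × List String) :=
  let flags := feature_columns.map pvIsRiskB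
  [("alpha", ((feature_columns.zip flags).filter (fun p => !p.2)).map (fun p => p.1)),
   ("risk", ((feature_columns.zip flags).filter (fun p => p.2)).map (fun p => p.1))]

-- ===== PRECONDITION & SPEC =====
def Spec_partition_features (feature_columns : List String) (out : List (String × List String)) : Prop := out = partition_features_alt feature_columns
instance (feature_columns : List String) (out : List (String × List String)) : Decidable (Spec_partition_features feature_columns out) := by unfold Spec_partition_features; infer_instance

-- ===== CLAIM (what is proved, stated in full; the proofs are below) =====
def Claim_equal_partition_features : Prop := ∀ (feature_columns : List String), Dom_partition_features feature_columns → Spec_partition_features feature_columns (partition_features feature_columns)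

-- ===== LEMMAS AND PROOFS =====

lemma pv_isspace_lowerChar {c : Char} (h : PySem.Chars.isspace c = true) :
    PySem.Chars.lowerChar c = c := by
  unfold PySem.Chars.lowerChar
  rw [if_neg]
  intro hu
  have hu' : 65 ≤ c.toNat ∧ c.toNat ≤ 90 := by
    simp only [PySem.Chars.isupper, Bool.and_eq_true, decide_eq_true_eq, Char.le_def] at hu
    exact hu
  simp [PySem.Chars.isspace] at h
  omega

lemma pv_replace_go_id (old new : List Char) :
    ∀ (fuel : Nat) (l acc : List Char), ¬ old <:+: l →
      PySem.Chars.replace.go old new fuel l acc = acc.reverse ++ l := by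
  intro fuel
  induction fuel with
  | zero => intro l acc _; simp [PySem.Chars.replace.go]
  | succ n ih =>
      intro l acc h
      cases l with
      | nil => simp [PySem.Chars.replace.go]
      | cons c t =>
          have hpre : old.isPrefixOf (c :: t) = false := by
            rw [Bool.eq_false_iff]
            intro hb
            exact h ((List.isPrefixOf_iff_prefix.mp hb).isInfix)
          rw [show PySem.Chars.replace.go old new (n+1) (c::t) acc
                = PySem.Chars.replace.go old new n t (c::acc) by
              simp [PySem.Chars.replace.go, hpre]]
          rw [ih t (c::acc) (fun hi => h (List.infix_cons_iff.mpr (Or.inr hi)))]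
          simp

lemma pv_replace_id (s old new : String) (h0 : old.toList ≠ [])
    (h : ¬ old.toList <:+: s.toList) : PySem.Str.replace s old new = s := by
  rw [← String.toList_inj, PySem.Str.toList_replace]
  unfold PySem.Chars.replace
  rw [if_neg (by simpa [List.isEmpty_iff] using h0)]
  simpa using pv_replace_go_id old.toList new.toList s.toList.length s.toList [] h

lemma pv_splitOn_go_acc (sep : List Char) :
    ∀ (fuel : Nat) (l cur : List Char) (acc : List (List Char)),
      PySem.Chars.splitOn.go sep fuel l cur acc
        = acc.reverse ++ PySem.Chars.splitOn.go sep fuel l cur [] := by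
  intro fuel
  induction fuel with
  | zero => intro l cur acc; simp [PySem.Chars.splitOn.go]
  | succ n ih =>
      intro l cur acc
      cases l with
      | nil => simp [PySem.Chars.splitOn.go]
      | cons c t =>
          by_cases hpre : sep.isPrefixOf (c :: t) = true
          · rw [show PySem.Chars.splitOn.go sep (n+1) (c::t) cur acc
                  = PySem.Chars.splitOn.go sep n ((c::t).drop sep.length) [] (cur.reverse :: acc) by
                simp [PySem.Chars.splitOn.go, hpre],
              show PySem.Chars.splitOn.go sep (n+1) (c::t) cur []
                  = PySem.Chars.splitOn.go sep n ((c::t).drop sep.length) [] [cur.reverse] by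
                simp [PySem.Chars.splitOn.go, hpre]]
            rw [ih _ _ (cur.reverse :: acc), ih _ _ [cur.reverse]]
            simp
          · rw [show PySem.Chars.splitOn.go sep (n+1) (c::t) cur acc
                  = PySem.Chars.splitOn.go sep n t (c :: cur) acc by
                simp [PySem.Chars.splitOn.go, hpre],
              show PySem.Chars.splitOn.go sep (n+1) (c::t) cur []
                  = PySem.Chars.splitOn.go sep n t (c :: cur) [] by
                simp [PySem.Chars.splitOn.go, hpre]]
            exact ih t (c::cur) acc

lemma pv_infix_append_pipe {q a b : List Char} (hp : '|' ∉ q) :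
    q <:+: a ++ '|' :: b ↔ q <:+: a ∨ q <:+: b := by
  constructor
  · rintro ⟨s, t, h⟩
    have hlentot := congrArg List.length h
    simp only [List.length_append, List.length_cons] at hlentot
    by_cases h1 : s.length + q.length ≤ a.length
    · left
      have hpre : s ++ q <+: a ++ '|' :: b := ⟨t, by simpa [List.append_assoc] using h⟩
      have hpa : s ++ q <+: a :=
        List.prefix_of_prefix_length_le hpre (List.prefix_append a ('|' :: b))
          (by simpa using h1)
      exact List.IsInfix.trans (List.suffix_append s q).isInfix hpa.isInfix
    · by_cases h2 : a.length < s.length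
      · right
        have hsuf : q ++ t <:+ a ++ '|' :: b := ⟨s, by simpa [List.append_assoc] using h⟩
        have hb : b <:+ a ++ '|' :: b := (List.suffix_cons '|' b).trans ⟨a, rfl⟩
        have hlen : (q ++ t).length ≤ b.length := by simp; omega
        have : q ++ t <:+ b := List.suffix_of_suffix_length_le hsuf hb hlen
        exact List.IsInfix.trans (List.prefix_append q t).isInfix this.isInfix
      · exfalso
        apply hp
        have hlen : a.length - s.length < q.length := by omega
        have hi : a.length < (s ++ q ++ t).length := by simp; omega
        have hget : (s ++ q ++ t)[a.length]'hi = '|' := by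
          rw [List.getElem_of_eq h]
          rw [List.getElem_append_right (by omega)]
          simp
        rw [List.getElem_append_left (by simp; omega),
            List.getElem_append_right (by omega)] at hget
        rw [← hget]
        exact List.getElem_mem _
  · rintro (h | h)
    · exact List.IsInfix.trans h ⟨[], '|'::b, by simp⟩
    · exact List.IsInfix.trans h ⟨a ++ ['|'], [], by simp⟩

lemma pv_lowerChar_pipe : PySem.Chars.lowerChar '|' = '|' := by decide

lemma pv_infix_cons_pipe {q b : List Char} (hq : q ≠ []) (hp : '|' ∉ q) :
    q <:+: '|' :: b ↔ q <:+: b := by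
  have h := pv_infix_append_pipe (a := []) (b := b) hp
  simp only [List.nil_append] at h
  rw [h]
  simp [List.infix_nil, hq]

lemma pv_infix_lower_seg (q cur l' : List Char) (hq : q ≠ []) (hp : '|' ∉ q) :
    q <:+: PySem.Chars.lower (cur.reverse ++ ('|'::'|'::'|'::l')) ↔
      (q <:+: PySem.Chars.lower cur.reverse ∨ q <:+: PySem.Chars.lower l') := by
  unfold PySem.Chars.lower
  rw [List.map_append]
  simp only [List.map_cons, pv_lowerChar_pipe]
  rw [pv_infix_append_pipe hp, pv_infix_cons_pipe hq hp, pv_infix_cons_pipe hq hp]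

lemma pv_exists_part_go (q : List Char) (hq : q ≠ []) (hp : '|' ∉ q) :
    ∀ (fuel : Nat) (l cur : List Char), l.length < fuel →
      ((∃ part ∈ PySem.Chars.splitOn.go ['|','|','|'] fuel l cur [], q <:+: PySem.Chars.lower part)
        ↔ q <:+: PySem.Chars.lower (cur.reverse ++ l)) := by
  intro fuel
  induction fuel with
  | zero => intro l cur h; omega
  | succ n ih =>
      intro l cur hlen
      by_cases hpre : (['|','|','|'] : List Char).isPrefixOf l = true
      · obtain ⟨l', rfl⟩ := List.isPrefixOf_iff_prefix.mp hpre
        simp only [List.cons_append, List.nil_append] at hlen ⊢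
        have hstep : PySem.Chars.splitOn.go ['|','|','|'] (n+1) ('|'::'|'::'|'::l') cur []
            = cur.reverse :: PySem.Chars.splitOn.go ['|','|','|'] n l' [] [] := by
          rw [show PySem.Chars.splitOn.go ['|','|','|'] (n+1) ('|'::'|'::'|'::l') cur []
                = PySem.Chars.splitOn.go ['|','|','|'] n l' [] [cur.reverse] by
              simp [PySem.Chars.splitOn.go, List.isPrefixOf]]
          rw [pv_splitOn_go_acc]
          simp
        rw [hstep, pv_infix_lower_seg q cur l' hq hp]
        have hlen' : l'.length < n := by simp at hlen; omega
        have ihl := ih l' [] hlen'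
        simp only [List.reverse_nil, List.nil_append] at ihl
        constructor
        · rintro ⟨part, hmem, hinf⟩
          rcases List.mem_cons.mp hmem with rfl | hmem'
          · exact Or.inl hinf
          · exact Or.inr (ihl.mp ⟨part, hmem', hinf⟩)
        · rintro (h1 | h2)
          · exact ⟨cur.reverse, List.mem_cons_self, h1⟩
          · obtain ⟨part, hmem, hinf'⟩ := ihl.mpr h2
            exact ⟨part, List.mem_cons_of_mem _ hmem, hinf'⟩
      · cases l with
        | nil =>
            rw [show PySem.Chars.splitOn.go ['|','|','|'] (n+1) [] cur [] = [cur.reverse] by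
              simp [PySem.Chars.splitOn.go]]
            simp
        | cons c t =>
            rw [show PySem.Chars.splitOn.go ['|','|','|'] (n+1) (c::t) cur []
                  = PySem.Chars.splitOn.go ['|','|','|'] n t (c::cur) [] by
                simp [PySem.Chars.splitOn.go, hpre]]
            have := ih t (c :: cur) (by simp at hlen ⊢; omega)
            rw [this]
            simp

lemma pv_exists_part_splitOn (q : List Char) (s : List Char) (hq : q ≠ []) (hp : '|' ∉ q) :
    (∃ part ∈ PySem.Chars.splitOn s ['|','|','|'], q <:+: PySem.Chars.lower part)
      ↔ q <:+: PySem.Chars.lower s := by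
  unfold PySem.Chars.splitOn
  rw [pv_exists_part_go q hq hp (s.length + 1) s [] (by omega)]
  simp

lemma pv_pattern_facts_bool : pvRiskPatternsA.all (fun p =>
    !(PySem.Str.lower p).toList.isEmpty
    && (PySem.Str.lower p).toList.all (fun c => !PySem.Chars.isspace c)
    && !(PySem.Str.lower p).toList.contains '|') = true := by rfl

lemma pv_pattern_facts : ∀ p ∈ pvRiskPatternsA,
    (PySem.Str.lower p).toList ≠ [] ∧
    (∀ c ∈ (PySem.Str.lower p).toList, PySem.Chars.isspace c = false) ∧
    '|' ∉ (PySem.Str.lower p).toList := by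
  intro p hp
  have h := List.all_eq_true.mp pv_pattern_facts_bool p hp
  simp only [Bool.and_eq_true, Bool.not_eq_true', List.all_eq_true] at h
  refine ⟨by simpa [List.isEmpty_iff] using h.1.1, h.1.2, ?_⟩
  intro hc
  have h2 := h.2
  rw [List.contains_eq_mem] at h2
  simp only [decide_eq_false_iff_not] at h2
  exact h2 hc

lemma pv_infix_lower_dropWhile (q : List Char) (hq : q ≠ [])
    (hs : ∀ c ∈ q, PySem.Chars.isspace c = false) :
    ∀ x : List Char,
      (q <:+: PySem.Chars.lower (List.dropWhile PySem.Chars.isspace x) ↔ q <:+: PySem.Chars.lower x) := by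
  intro x
  induction x with
  | nil => simp
  | cons c t ih =>
      by_cases hc : PySem.Chars.isspace c = true
      · rw [List.dropWhile_cons, if_pos hc, ih]
        unfold PySem.Chars.lower
        rw [List.map_cons, pv_isspace_lowerChar hc]
        rw [List.infix_cons_iff]
        constructor
        · exact Or.inr
        · rintro (hpre | h)
          · obtain ⟨qh, qt, rfl⟩ : ∃ qh qt, q = qh :: qt := by
              cases q with
              | nil => exact absurd rfl hq
              | cons a b => exact ⟨a, b, rfl⟩
            obtain ⟨rfl, -⟩ := List.cons_prefix_cons.mp hpre
            exact absurd hc (by simpa using hs qh (by simp))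
          · exact h
      · rw [List.dropWhile_cons, if_neg hc]

lemma pv_rev_infix (u Y : List Char) : u <:+: Y.reverse ↔ u.reverse <:+: Y := by
  constructor
  · intro h
    have h2 := List.reverse_infix.mpr h
    simpa using h2
  · intro h
    have h2 := List.reverse_infix.mpr h
    simpa using h2

lemma pv_infix_lower_strip (q : List Char) (hq : q ≠ [])
    (hs : ∀ c ∈ q, PySem.Chars.isspace c = false) (x : List Char) :
    q <:+: PySem.Chars.lower (PySem.Chars.strip x) ↔ q <:+: PySem.Chars.lower x := by
  have hq' : q.reverse ≠ [] := by simpa using hq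
  have hs' : ∀ c ∈ q.reverse, PySem.Chars.isspace c = false := by
    intro c hc; exact hs c (List.mem_reverse.mp hc)
  unfold PySem.Chars.strip PySem.Chars.rstrip PySem.Chars.lstrip
  rw [show PySem.Chars.lower (List.dropWhile PySem.Chars.isspace
        (List.dropWhile PySem.Chars.isspace x).reverse).reverse
      = (PySem.Chars.lower (List.dropWhile PySem.Chars.isspace
        (List.dropWhile PySem.Chars.isspace x).reverse)).reverse by
    simp [PySem.Chars.lower]]
  rw [pv_rev_infix]
  rw [pv_infix_lower_dropWhile q.reverse hq' hs']
  rw [show PySem.Chars.lower (List.dropWhile PySem.Chars.isspace x).reverse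
      = (PySem.Chars.lower (List.dropWhile PySem.Chars.isspace x)).reverse by
    simp [PySem.Chars.lower]]
  rw [← pv_rev_infix, List.reverse_reverse]
  exact pv_infix_lower_dropWhile q hq hs x

lemma pv_matchesA_iff (name : String) : pvMatchesRiskA name = true ↔
    ∃ p ∈ pvRiskPatternsA, (PySem.Str.lower p).toList <:+: PySem.Chars.lower name.toList := by
  simp [pvMatchesRiskA, List.any_eq_true, PySem.Chars.isIn_iff_infix, PySem.Str.toList_lower]

lemma pv_matchesA_strip (p : String) :
    pvMatchesRiskA (PySem.Str.strip p) = pvMatchesRiskA p := by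
  rw [Bool.eq_iff_iff, pv_matchesA_iff, pv_matchesA_iff]
  constructor <;> rintro ⟨pat, hpat, hinf⟩ <;> refine ⟨pat, hpat, ?_⟩ <;>
    obtain ⟨hq, hsp, -⟩ := pv_pattern_facts pat hpat
  · rw [PySem.Str.toList_strip, pv_infix_lower_strip _ hq hsp] at hinf
    exact hinf
  · rw [PySem.Str.toList_strip, pv_infix_lower_strip _ hq hsp]
    exact hinf

lemma pv_strip_ne_of_matches (p : String) (h : pvMatchesRiskA (PySem.Str.strip p) = true) :
    PySem.Str.strip p ≠ "" := by
  intro he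
  rw [he] at h
  obtain ⟨pat, hpat, hinf⟩ := (pv_matchesA_iff _).mp h
  obtain ⟨hq, -, -⟩ := pv_pattern_facts pat hpat
  have : ("" : String).toList = [] := rfl
  rw [this] at hinf
  exact hq (List.infix_nil.mp (by simpa [PySem.Chars.lower] using hinf))

lemma pv_if_risk (b : Bool) : ((if b then "risk" else "alpha" : String) == "risk") = b := by
  cases b <;> decide

lemma pv_partlist_any (parts : List String) :
    ((parts.map PySem.Str.strip).filter (fun p => p ≠ "")).any pvMatchesRiskA
      = parts.any pvMatchesRiskA := by
  have hpt : ∀ p : String,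
      (decide (PySem.Str.strip p ≠ "") && pvMatchesRiskA (PySem.Str.strip p)) = pvMatchesRiskA p := by
    intro p
    by_cases hm : pvMatchesRiskA p = true
    · have hsm : pvMatchesRiskA (PySem.Str.strip p) = true := by rw [pv_matchesA_strip]; exact hm
      simp [hsm, hm, pv_strip_ne_of_matches p hsm]
    · have hsm : pvMatchesRiskA (PySem.Str.strip p) = false := by
        rw [pv_matchesA_strip]; exact Bool.eq_false_iff.mpr hm
      simp [hsm, Bool.eq_false_iff.mpr hm]
  rw [List.any_filter, List.any_map]
  exact congrArg (List.any parts) (funext fun p => by simpa [Function.comp] using hpt p)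

lemma pv_parts_eq (s : String) : (PySem.Str.split? s "|||").getD []
    = (PySem.Chars.splitOn s.toList ['|','|','|']).map String.ofList := by
  simp [PySem.Str.split?, PySem.Chars.split?]

lemma pv_any_parts_matches (f : String) :
    (((PySem.Str.split? f "|||").getD []).any pvMatchesRiskA) = pvMatchesRiskA f := by
  rw [pv_parts_eq, List.any_map, Bool.eq_iff_iff]
  simp only [List.any_eq_true, Function.comp]
  rw [pv_matchesA_iff]
  constructor
  · rintro ⟨cs, hmem, hmatch⟩
    obtain ⟨p, hp, hinf⟩ := (pv_matchesA_iff _).mp hmatch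
    rw [String.toList_ofList] at hinf
    obtain ⟨hq, -, hpipe⟩ := pv_pattern_facts p hp
    exact ⟨p, hp, (pv_exists_part_splitOn _ f.toList hq hpipe).mp ⟨cs, hmem, hinf⟩⟩
  · rintro ⟨p, hp, hinf⟩
    obtain ⟨hq, -, hpipe⟩ := pv_pattern_facts p hp
    obtain ⟨cs, hmem, hinf'⟩ := (pv_exists_part_splitOn _ f.toList hq hpipe).mpr hinf
    refine ⟨cs, hmem, (pv_matchesA_iff _).mpr ⟨p, hp, ?_⟩⟩
    rw [String.toList_ofList]
    exact hinf'

lemma pv_marker_map_lower : ∀ m ∈ pvInteractionMarkersA,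
    List.map PySem.Chars.lowerChar m.toList = m.toList := by decide

lemma pv_not_infix_marker (f m : String) (hm : m ∈ pvInteractionMarkersA)
    (h : PySem.Str.isIn m (PySem.Str.lower f) = false) : ¬ m.toList <:+: f.toList := by
  intro hi
  have h2 := List.IsInfix.map PySem.Chars.lowerChar hi
  rw [pv_marker_map_lower m hm] at h2
  have h3 : m.toList <:+: (PySem.Str.lower f).toList := by
    rw [PySem.Str.toList_lower]
    simpa [PySem.Chars.lower] using h2
  rw [← PySem.Str.isIn_iff_infix, h] at h3
  exact absurd h3 (by simp)

lemma pv_foldl_replace_id (f : String)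
    (hall : ∀ m ∈ pvInteractionMarkersA, PySem.Str.isIn m (PySem.Str.lower f) = false) :
    pvInteractionMarkersA.foldl (fun s marker => PySem.Str.replace s marker "|||") f = f := by
  simp only [pvInteractionMarkersA, List.foldl_cons, List.foldl_nil]
  rw [pv_replace_id f "_x_" _ (by decide)
        (pv_not_infix_marker f "_x_" (by simp [pvInteractionMarkersA]) (hall _ (by simp [pvInteractionMarkersA]))),
      pv_replace_id f "_div_" _ (by decide)
        (pv_not_infix_marker f "_div_" (by simp [pvInteractionMarkersA]) (hall _ (by simp [pvInteractionMarkersA]))),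
      pv_replace_id f "_minus_" _ (by decide)
        (pv_not_infix_marker f "_minus_" (by simp [pvInteractionMarkersA]) (hall _ (by simp [pvInteractionMarkersA]))),
      pv_replace_id f "_in_" _ (by decide)
        (pv_not_infix_marker f "_in_" (by simp [pvInteractionMarkersA]) (hall _ (by simp [pvInteractionMarkersA])))]

-- the first-character bucket of the built dict is the filter of the patterns
lemma pv_bucket (c : Char) :
    pvByFirstB.getD c [] = pvRiskLowerB.filter (fun pat => pat.toList.headD ' ' == c) := by
  unfold pvByFirstB
  rw [show (pvRiskLowerB.foldl
        (fun d pat => d.modify (pat.toList.headD ' ') [] (· ++ [pat])) PySem.Dict.empty)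
      = ((pvRiskLowerB.map (fun pat => (pat.toList.headD ' ', pat))).foldl
          (fun d p => d.modify p.1 [] (· ++ [p.2])) PySem.Dict.empty) by
    rw [List.foldl_map]]
  rw [PySem.Dict.getD_foldl_modify_append]
  simp [List.filter_map, Function.comp_def]

-- B's position-driven bucketed scan over s (a pattern starting with low[i]
-- starts at index i) is exactly "some pattern is an infix", i.e. A's matcher.
lemma pv_scan_matches (s : String) :
    ((PySem.List.enumerate (PySem.Chars.lower s.toList)).any (fun ic =>
      (pvByFirstB.getD ic.2 []).any (fun pat =>
        PySem.Chars.startswith ((PySem.Chars.lower s.toList).drop ic.1.toNat) pat.toList)))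
    = pvMatchesRiskA s := by
  have hBA : pvRiskPatternsB = pvRiskPatternsA := rfl
  rw [Bool.eq_iff_iff, pv_matchesA_iff]
  simp only [List.any_eq_true, PySem.Chars.startswith_iff, pv_bucket, List.mem_filter,
    pvRiskLowerB, hBA, List.mem_map, PySem.List.mem_enumerate_iff]
  constructor
  · rintro ⟨ic, ⟨k, hk, rfl⟩, pat, ⟨⟨p, hp, rfl⟩, -⟩, hpre⟩
    exact ⟨p, hp, List.infix_iff_prefix_suffix.mpr ⟨_, hpre, List.drop_suffix _ _⟩⟩
  · rintro ⟨p, hp, hinf⟩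
    obtain ⟨hq, -, -⟩ := pv_pattern_facts p hp
    obtain ⟨pre, suf, h⟩ := hinf
    have h' : pre ++ ((PySem.Str.lower p).toList ++ suf) = PySem.Chars.lower s.toList := by
      rw [← List.append_assoc, h]
    have hlenlt : pre.length < (PySem.Chars.lower s.toList).length := by
      have := congrArg List.length h
      simp only [List.length_append] at this
      have hqlen : 0 < (PySem.Str.lower p).toList.length := List.length_pos_iff.mpr hq
      omega
    obtain ⟨c0, pt, hpat⟩ : ∃ c0 pt, (PySem.Str.lower p).toList = c0 :: pt := by
      cases hx : (PySem.Str.lower p).toList with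
      | nil => exact absurd hx hq
      | cons a b => exact ⟨a, b, rfl⟩
    have hchar : (PySem.Chars.lower s.toList)[pre.length]'hlenlt = c0 := by
      rw [List.getElem_of_eq h'.symm, List.getElem_append_right (le_refl _)]
      simp [hpat]
    refine ⟨((pre.length : Int), c0), ⟨pre.length, hlenlt, by rw [hchar]; simp⟩,
      PySem.Str.lower p, ⟨⟨p, hp, rfl⟩, by simp [hpat]⟩, ?_⟩
    rw [Int.toNat_natCast, ← h, List.append_assoc, List.drop_left]
    exact ⟨suf, rfl⟩

-- B's staged zip-filter over precomputed flags is the plain filter.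
lemma pv_zip_filter (h : Bool → Bool) (g : String → Bool) (cols : List String) :
    (((cols.zip (cols.map g)).filter (fun p => h p.2)).map (fun p => p.1))
      = cols.filter (fun f => h (g f)) := by
  induction cols with
  | nil => simp
  | cons x xs ih =>
      simp only [List.map_cons, List.zip_cons_cons, List.filter_cons]
      cases hx : h (g x) <;> simp [ih]

lemma pv_classify_eq (f : String) : (pvClassifyFeatureRoleA f == "risk") = pvIsRiskB f := by
  have hmk : pvMarkersB = pvInteractionMarkersA := rfl
  simp only [pvClassifyFeatureRoleA, pvIsRiskB, hmk, pv_scan_matches]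
  by_cases h : pvInteractionMarkersA.any (fun m => PySem.Str.isIn m (PySem.Str.lower f)) = true
  · rw [if_pos h, pv_if_risk, pv_partlist_any, pv_any_parts_matches]
  · rw [if_neg h, pv_if_risk]
    rw [pv_foldl_replace_id f (fun m hm => Bool.eq_false_iff.mpr
      (fun hmt => h (List.any_eq_true.mpr ⟨m, hm, hmt⟩)))]

lemma pv_foldl_partition (l : List String) (a r : List String) :
    l.foldl (fun (acc : List String × List String) f =>
        if pvClassifyFeatureRoleA f == "risk" then (acc.1, acc.2 ++ [f]) else (acc.1 ++ [f], acc.2))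
      (a, r)
      = (a ++ l.filter (fun f => !(pvClassifyFeatureRoleA f == "risk")),
         r ++ l.filter (fun f => pvClassifyFeatureRoleA f == "risk")) := by
  induction l generalizing a r with
  | nil => simp
  | cons x xs ih =>
      by_cases h : (pvClassifyFeatureRoleA x == "risk") = true
      · simp only [List.foldl_cons, List.filter_cons, h, ih]
        simp
      · simp only [List.foldl_cons, List.filter_cons, ih,
          Bool.not_eq_eq_eq_not, Bool.not_true, h]
        simp

-- ===== VERDICT (by name: the statement is the Claim_ definition above) =====
theorem partition_features_spec : Claim_equal_partition_features := by
  intro cols _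
  unfold Spec_partition_features partition_features partition_features_alt
  have hA : cols.filter (fun f => !(pvClassifyFeatureRoleA f == "risk"))
      = cols.filter (fun f => !(pvIsRiskB f)) :=
    List.filter_congr (fun f _ => by rw [pv_classify_eq])
  have hR : cols.filter (fun f => (pvClassifyFeatureRoleA f == "risk"))
      = cols.filter (fun f => pvIsRiskB f) :=
    List.filter_congr (fun f _ => by rw [pv_classify_eq])
  simp only [pv_foldl_partition, List.nil_append,
    pv_zip_filter (fun b => !b) pvIsRiskB, pv_zip_filter (fun b => b) pvIsRiskB]
  simp [hA, hR]
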